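-- pv_equiv track=rewrite | github.com/tristanfrench/finalYearProject | src/categ_nn.py | __categorize_labels
-- ===== SOURCE A (Python) =====
-- def __categorize_labels(label):
--     for idx,i in enumerate(label):
--         if i<-40:
--             label[idx] = 0
--         elif i<-35:
--             label[idx] = 1
--         elif i<-30:
--             label[idx] = 2
--         elif i<-25:
--             label[idx] = 3
--         elif i<-20:
--             label[idx] = 4
--         elif i<-15:
--             label[idx] = 5
--         elif i<-10:
--             label[idx] = 6
--         elif i<-5:
--             label[idx] = 7
--         elif i<0:
--             label[idx] = 8
--         elif i<5:
--             label[idx] = 9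
--         elif i<10:
--             label[idx] = 10
--         elif i<15:
--             label[idx] = 11
--         elif i<20:
--             label[idx] = 12
--         elif i<25:
--             label[idx] = 13
--         elif i<30:
--             label[idx] = 14
--         elif i<35:
--             label[idx] = 15
--         elif i<40:
--             label[idx] = 16
--         else:
--             label[idx] = 17
--         #one-hot-encode labels, e.g:  2 becomes [0,0,1,0,0,0,0,0,0,0,0,0,0,0,0,0,0,0]
--         #label[idx] = to_categorical(label[idx], num_classes=18)
--     return label
-- ===== SOURCE B (Python) =====
-- def __categorize_labels(label):
--     # Binary search over the threshold table instead of an 18-way comparison chain.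
--     thresholds = [-40, -35, -30, -25, -20, -15, -10, -5, 0, 5, 10, 15, 20, 25, 30, 35, 40]
--     for idx, i in enumerate(label):
--         lo, hi = 0, len(thresholds)
--         while lo < hi:
--             mid = (lo + hi) // 2
--             if i < thresholds[mid]:
--                 hi = mid
--             else:
--                 lo = mid + 1
--         label[idx] = lo
--     return label
-- ===== Notes on version B (the rewrite author's own statement) =====
-- stated objective: idiomatic
-- what changed: Replaced the hand-written 18-way if/elif comparison chain with a binary search (bisect_right by hand) over a precomputed sorted threshold table; the element loop still mutates label in place and returns it.
import Mathlib
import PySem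

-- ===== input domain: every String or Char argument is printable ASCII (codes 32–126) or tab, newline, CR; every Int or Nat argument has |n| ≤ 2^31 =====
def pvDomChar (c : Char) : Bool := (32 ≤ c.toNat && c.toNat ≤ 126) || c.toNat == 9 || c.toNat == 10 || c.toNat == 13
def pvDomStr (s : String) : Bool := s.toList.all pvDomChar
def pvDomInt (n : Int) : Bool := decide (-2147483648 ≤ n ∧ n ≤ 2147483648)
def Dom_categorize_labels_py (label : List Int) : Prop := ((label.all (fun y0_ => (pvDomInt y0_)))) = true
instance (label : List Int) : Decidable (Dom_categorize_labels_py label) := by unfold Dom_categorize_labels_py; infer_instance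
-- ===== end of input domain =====

-- B replaces A's 18-way linear comparison chain by a binary search over a threshold table
-- (objective: idiomatic). Both Pythons mutate `label` in place and return it; the
-- equivalence proved here is about the return value.

-- ===== PORT A =====
-- the 18-way elif chain applied to one element
def pvChainA (i : Int) : Int :=
  if i < -40 then 0
  else if i < -35 then 1
  else if i < -30 then 2
  else if i < -25 then 3
  else if i < -20 then 4
  else if i < -15 then 5
  else if i < -10 then 6
  else if i < -5 then 7
  else if i < 0 then 8
  else if i < 5 then 9
  else if i < 10 then 10
  else if i < 15 then 11
  else if i < 20 then 12
  else if i < 25 then 13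
  else if i < 30 then 14
  else if i < 35 then 15
  else if i < 40 then 16
  else 17

-- the `for idx, i in enumerate(label): label[idx] = …` loop rewrites each element in place
def categorize_labels_py (label : List Int) : List Int :=
  label.map pvChainA

-- ===== PORT B =====
def pvThresholds : List Int :=
  [-40, -35, -30, -25, -20, -15, -10, -5, 0, 5, 10, 15, 20, 25, 30, 35, 40]

-- the `while lo < hi` bisection loop; fuel bounds the iteration count (≥ hi−lo suffices);
-- `(lo+hi)//2` is Nat division here, exact since lo, hi are nonnegative indices
def pvBsr (x : Int) : Nat → Nat → Nat → Nat
  | 0, lo, _ => lo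
  | fuel + 1, lo, hi =>
    if lo < hi then
      let mid := (lo + hi) / 2
      if x < pvThresholds.getD mid 0 then pvBsr x fuel lo mid
      else pvBsr x fuel (mid + 1) hi
    else lo

def categorize_labels_py_alt (label : List Int) : List Int :=
  label.map (fun i => (pvBsr i pvThresholds.length 0 pvThresholds.length : Int))

-- ===== PRECONDITION & SPEC =====
def Spec_categorize_labels_py (label : List Int) (out : List Int) : Prop := out = categorize_labels_py_alt label
instance (label : List Int) (out : List Int) : Decidable (Spec_categorize_labels_py label out) := by unfold Spec_categorize_labels_py; infer_instance

-- ===== CLAIM (what is proved, stated in full; the proofs are below) =====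
def Claim_equal_categorize_labels_py : Prop := ∀ (label : List Int), Dom_categorize_labels_py label → Spec_categorize_labels_py label (categorize_labels_py label)

-- ===== LEMMAS AND PROOFS =====
-- the threshold table is sorted (monotone lookup)
theorem pvSorted : ∀ b, b < 17 → ∀ a, a ≤ b →
    pvThresholds.getD a 0 ≤ pvThresholds.getD b 0 := by decide

-- loop invariant of the bisection: thresholds below lo are ≤ x, thresholds from hi on are > x;
-- the loop returns the boundary index
theorem pvBsrInv (x : Int) : ∀ (fuel lo hi : Nat), hi - lo ≤ fuel → lo ≤ hi → hi ≤ 17 →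
    (∀ j, j < lo → pvThresholds.getD j 0 ≤ x) →
    (∀ j, hi ≤ j → j < 17 → x < pvThresholds.getD j 0) →
    pvBsr x fuel lo hi ≤ hi ∧
    (∀ j, j < pvBsr x fuel lo hi → pvThresholds.getD j 0 ≤ x) ∧
    (∀ j, pvBsr x fuel lo hi ≤ j → j < 17 → x < pvThresholds.getD j 0) := by
  intro fuel
  induction fuel with
  | zero =>
    intro lo hi hf hlh h17 hlow hhigh
    simp only [pvBsr]
    exact ⟨hlh, hlow, fun j hj hj17 => hhigh j (by omega) hj17⟩
  | succ n ih =>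
    intro lo hi hf hlh h17 hlow hhigh
    simp only [pvBsr]
    by_cases hc : lo < hi
    · simp only [hc, if_true]
      by_cases hx : x < pvThresholds.getD ((lo + hi) / 2) 0
      · simp only [hx, if_true]
        have h := ih lo ((lo + hi) / 2) (by omega) (by omega) (by omega) hlow
          (fun j hj hj17 => lt_of_lt_of_le hx (pvSorted j hj17 _ hj))
        exact ⟨by omega, h.2.1, h.2.2⟩
      · simp only [hx, if_false]
        exact ih ((lo + hi) / 2 + 1) hi (by omega) (by omega) h17
          (fun j hj => le_trans (pvSorted ((lo + hi) / 2) (by omega) j (by omega)) (by omega))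
          hhigh
    · simp only [hc, if_false]
      exact ⟨hlh, hlow, fun j hj hj17 => hhigh j (by omega) hj17⟩

-- pointwise agreement of the chain and the binary search
set_option maxHeartbeats 1600000 in
theorem pvPoint (x : Int) : pvChainA x = (pvBsr x pvThresholds.length 0 pvThresholds.length : Int) := by
  have hlen : pvThresholds.length = 17 := rfl
  rw [hlen]
  obtain ⟨hle, h3, h4⟩ := pvBsrInv x 17 0 17 (by omega) (by omega) (by omega)
    (fun j hj => absurd hj (by omega)) (fun j hj hj17 => absurd (lt_of_le_of_lt hj hj17) (by omega))
  generalize hg : pvBsr x 17 0 17 = r at hle h3 h4 ⊢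
  have key : ∀ j, j < 17 → (pvThresholds.getD j 0 ≤ x ↔ j < r) := by
    intro j hj
    constructor
    · intro h
      by_contra hc
      exact absurd (h4 j (by omega) hj) (by omega)
    · intro h
      exact h3 j h
  have k0 : (-40 : Int) ≤ x ↔ 0 < r := by simpa [pvThresholds] using key 0 (by omega)
  have k1 : (-35 : Int) ≤ x ↔ 1 < r := by simpa [pvThresholds] using key 1 (by omega)
  have k2 : (-30 : Int) ≤ x ↔ 2 < r := by simpa [pvThresholds] using key 2 (by omega)
  have k3 : (-25 : Int) ≤ x ↔ 3 < r := by simpa [pvThresholds] using key 3 (by omega)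
  have k4 : (-20 : Int) ≤ x ↔ 4 < r := by simpa [pvThresholds] using key 4 (by omega)
  have k5 : (-15 : Int) ≤ x ↔ 5 < r := by simpa [pvThresholds] using key 5 (by omega)
  have k6 : (-10 : Int) ≤ x ↔ 6 < r := by simpa [pvThresholds] using key 6 (by omega)
  have k7 : (-5 : Int) ≤ x ↔ 7 < r := by simpa [pvThresholds] using key 7 (by omega)
  have k8 : (0 : Int) ≤ x ↔ 8 < r := by simpa [pvThresholds] using key 8 (by omega)
  have k9 : (5 : Int) ≤ x ↔ 9 < r := by simpa [pvThresholds] using key 9 (by omega)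
  have k10 : (10 : Int) ≤ x ↔ 10 < r := by simpa [pvThresholds] using key 10 (by omega)
  have k11 : (15 : Int) ≤ x ↔ 11 < r := by simpa [pvThresholds] using key 11 (by omega)
  have k12 : (20 : Int) ≤ x ↔ 12 < r := by simpa [pvThresholds] using key 12 (by omega)
  have k13 : (25 : Int) ≤ x ↔ 13 < r := by simpa [pvThresholds] using key 13 (by omega)
  have k14 : (30 : Int) ≤ x ↔ 14 < r := by simpa [pvThresholds] using key 14 (by omega)
  have k15 : (35 : Int) ≤ x ↔ 15 < r := by simpa [pvThresholds] using key 15 (by omega)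
  have k16 : (40 : Int) ≤ x ↔ 16 < r := by simpa [pvThresholds] using key 16 (by omega)
  unfold pvChainA
  by_cases c0 : x < -40
  · rw [if_pos c0]
    omega
  by_cases c1 : x < -35
  · rw [if_neg c0, if_pos c1]
    omega
  by_cases c2 : x < -30
  · rw [if_neg c0, if_neg c1, if_pos c2]
    omega
  by_cases c3 : x < -25
  · rw [if_neg c0, if_neg c1, if_neg c2, if_pos c3]
    omega
  by_cases c4 : x < -20
  · rw [if_neg c0, if_neg c1, if_neg c2, if_neg c3, if_pos c4]
    omega
  by_cases c5 : x < -15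
  · rw [if_neg c0, if_neg c1, if_neg c2, if_neg c3, if_neg c4, if_pos c5]
    omega
  by_cases c6 : x < -10
  · rw [if_neg c0, if_neg c1, if_neg c2, if_neg c3, if_neg c4, if_neg c5, if_pos c6]
    omega
  by_cases c7 : x < -5
  · rw [if_neg c0, if_neg c1, if_neg c2, if_neg c3, if_neg c4, if_neg c5, if_neg c6, if_pos c7]
    omega
  by_cases c8 : x < 0
  · rw [if_neg c0, if_neg c1, if_neg c2, if_neg c3, if_neg c4, if_neg c5, if_neg c6, if_neg c7, if_pos c8]
    omega
  by_cases c9 : x < 5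
  · rw [if_neg c0, if_neg c1, if_neg c2, if_neg c3, if_neg c4, if_neg c5, if_neg c6, if_neg c7, if_neg c8, if_pos c9]
    omega
  by_cases c10 : x < 10
  · rw [if_neg c0, if_neg c1, if_neg c2, if_neg c3, if_neg c4, if_neg c5, if_neg c6, if_neg c7, if_neg c8, if_neg c9, if_pos c10]
    omega
  by_cases c11 : x < 15
  · rw [if_neg c0, if_neg c1, if_neg c2, if_neg c3, if_neg c4, if_neg c5, if_neg c6, if_neg c7, if_neg c8, if_neg c9, if_neg c10, if_pos c11]
    omega
  by_cases c12 : x < 20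
  · rw [if_neg c0, if_neg c1, if_neg c2, if_neg c3, if_neg c4, if_neg c5, if_neg c6, if_neg c7, if_neg c8, if_neg c9, if_neg c10, if_neg c11, if_pos c12]
    omega
  by_cases c13 : x < 25
  · rw [if_neg c0, if_neg c1, if_neg c2, if_neg c3, if_neg c4, if_neg c5, if_neg c6, if_neg c7, if_neg c8, if_neg c9, if_neg c10, if_neg c11, if_neg c12, if_pos c13]
    omega
  by_cases c14 : x < 30
  · rw [if_neg c0, if_neg c1, if_neg c2, if_neg c3, if_neg c4, if_neg c5, if_neg c6, if_neg c7, if_neg c8, if_neg c9, if_neg c10, if_neg c11, if_neg c12, if_neg c13, if_pos c14]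
    omega
  by_cases c15 : x < 35
  · rw [if_neg c0, if_neg c1, if_neg c2, if_neg c3, if_neg c4, if_neg c5, if_neg c6, if_neg c7, if_neg c8, if_neg c9, if_neg c10, if_neg c11, if_neg c12, if_neg c13, if_neg c14, if_pos c15]
    omega
  by_cases c16 : x < 40
  · rw [if_neg c0, if_neg c1, if_neg c2, if_neg c3, if_neg c4, if_neg c5, if_neg c6, if_neg c7, if_neg c8, if_neg c9, if_neg c10, if_neg c11, if_neg c12, if_neg c13, if_neg c14, if_neg c15, if_pos c16]
    omega
  rw [if_neg c0, if_neg c1, if_neg c2, if_neg c3, if_neg c4, if_neg c5, if_neg c6, if_neg c7, if_neg c8, if_neg c9, if_neg c10, if_neg c11, if_neg c12, if_neg c13, if_neg c14, if_neg c15, if_neg c16]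
  omega

-- ===== VERDICT (by name: the statement is the Claim_ definition above) =====
theorem categorize_labels_py_spec : Claim_equal_categorize_labels_py := by
  intro label _
  unfold Spec_categorize_labels_py categorize_labels_py categorize_labels_py_alt
  exact List.map_congr_left fun x _ => pvPoint x
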